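-- pv_equiv track=rewrite | github.com/TonyKerguen/Python-1A | TP8a/motdepasse.py | plus_petit_chiffre_apparait_une_seul_fois
-- ===== SOURCE A (Python) =====
-- def plus_petit_chiffre_apparait_une_seul_fois(chaine):
--     """verifie qu'une chaine ne contient qu'une seul fois le plus petit chiffre
--
--     Args:
--         chaine (str): une chaine de caracteres
--
--     Returns:
--         bool: True si la chaine ne contient qu'une seul fois le plus petit chiffre, False sinon
--     """
--     nb_apparition_plus_petit_nombre = 0
--     plus_petit_nombre = None
--     for lettre in chaine:
--         if lettre.isdigit():
--             if plus_petit_nombre == None: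
--                 plus_petit_nombre = lettre
--                 nb_apparition_plus_petit_nombre = 1
--             elif lettre < plus_petit_nombre:
--                 plus_petit_nombre = lettre
--                 nb_apparition_plus_petit_nombre = 1
--             elif lettre == plus_petit_nombre:
--                 nb_apparition_plus_petit_nombre += 1
--     return nb_apparition_plus_petit_nombre == 1
-- ===== SOURCE B (Python) =====
-- def plus_petit_chiffre_apparait_une_seul_fois(chaine):
--     digits = [c for c in chaine if c.isdigit()]
--     if not digits:
--         return False
--     m = min(digits)
--     return digits.count(m) == 1
-- ===== Notes on version B (the rewrite author's own statement) =====
-- stated objective: simpler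
-- what changed: Replaces A's single fused min-tracking-and-counting loop (running minimum with a reset counter) by three plain phases: collect the digits with a comprehension, take min(), and count its occurrences.
import Mathlib
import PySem

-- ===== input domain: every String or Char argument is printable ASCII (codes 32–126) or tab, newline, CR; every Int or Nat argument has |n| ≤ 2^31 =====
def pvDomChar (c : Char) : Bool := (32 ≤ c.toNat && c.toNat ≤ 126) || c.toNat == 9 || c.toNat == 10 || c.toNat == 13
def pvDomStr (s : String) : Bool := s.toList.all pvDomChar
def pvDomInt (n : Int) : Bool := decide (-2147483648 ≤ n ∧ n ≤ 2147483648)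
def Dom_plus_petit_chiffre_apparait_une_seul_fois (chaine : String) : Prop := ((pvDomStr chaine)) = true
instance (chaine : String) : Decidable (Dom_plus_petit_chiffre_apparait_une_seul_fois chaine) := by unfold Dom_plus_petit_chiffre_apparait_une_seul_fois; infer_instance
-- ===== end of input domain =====

-- B replaces A's fused min-tracking-and-counting loop by three phases (collect digits, min, count); same cost, simpler.

-- ===== PORT A =====
-- one loop iteration of A: on a digit, reset/track the running minimum and its count
def pvStepA (s : Int × Option Char) (lettre : Char) : Int × Option Char :=
  if PySem.Chars.isdigit lettre then
    match s.2 with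
    | none => (1, some lettre)
    | some m =>
      if lettre < m then (1, some lettre)
      else if lettre == m then (s.1 + 1, some m)
      else s
  else s

def plus_petit_chiffre_apparait_une_seul_fois (chaine : String) : Bool :=
  (chaine.toList.foldl pvStepA (0, none)).1 == 1

-- ===== PORT B =====
def plus_petit_chiffre_apparait_une_seul_fois_alt (chaine : String) : Bool :=
  let digits := chaine.toList.filter PySem.Chars.isdigit
  match PySem.List.min? digits (fun c => c) with
  | none => false
  | some m => digits.count m == 1

-- ===== PRECONDITION & SPEC =====
def Spec_plus_petit_chiffre_apparait_une_seul_fois (chaine : String) (out : Bool) : Prop := out = plus_petit_chiffre_apparait_une_seul_fois_alt chaine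
instance (chaine : String) (out : Bool) : Decidable (Spec_plus_petit_chiffre_apparait_une_seul_fois chaine out) := by unfold Spec_plus_petit_chiffre_apparait_une_seul_fois; infer_instance

-- ===== CLAIM (what is proved, stated in full; the proofs are below) =====
def Claim_equal_plus_petit_chiffre_apparait_une_seul_fois : Prop := ∀ (chaine : String), Dom_plus_petit_chiffre_apparait_une_seul_fois chaine → Spec_plus_petit_chiffre_apparait_une_seul_fois chaine (plus_petit_chiffre_apparait_une_seul_fois chaine)

-- ===== LEMMAS AND PROOFS =====

theorem pv_foldl_min_le (l : List Char) (a : Char) : l.foldl min a ≤ a := by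
  induction l generalizing a with
  | nil => exact le_refl a
  | cons x t ih => exact le_trans (ih (min a x)) (min_le_left a x)

-- A's loop from a some-state, characterised by the digits of the remainder
theorem pv_foldl_stepA_some (l : List Char) (m : Char) (k : Int) :
    l.foldl pvStepA (k, some m) =
      ((if (l.filter PySem.Chars.isdigit).foldl min m = m
          then k + ((l.filter PySem.Chars.isdigit).count m : Int)
          else ((l.filter PySem.Chars.isdigit).count ((l.filter PySem.Chars.isdigit).foldl min m) : Int)),
       some ((l.filter PySem.Chars.isdigit).foldl min m)) := by
  induction l generalizing m k with
  | nil => simp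
  | cons c t ih =>
    by_cases hd : PySem.Chars.isdigit c = true
    · by_cases hlt : c < m
      · have hmin : min m c = c := min_eq_right (le_of_lt hlt)
        have hmm : (t.filter PySem.Chars.isdigit).foldl min c ≤ c := pv_foldl_min_le _ _
        simp only [List.foldl_cons, pvStepA, hd, if_true, hlt, List.filter_cons, hmin]
        rw [ih]
        have hne : (t.filter PySem.Chars.isdigit).foldl min c ≠ m := fun h => absurd hlt (by
          rw [← h]; exact not_lt.mpr hmm)
        have hcm : c ≠ m := ne_of_lt hlt
        by_cases he : (t.filter PySem.Chars.isdigit).foldl min c = c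
        · simp [he, hcm]; ring
        · have : c ≠ (t.filter PySem.Chars.isdigit).foldl min c := fun h => he h.symm
          simp [he, hne, this]
      · by_cases heq : c = m
        · subst heq
          have hmin : min c c = c := min_self c
          simp only [List.foldl_cons, pvStepA, hd, if_true, hlt, if_false, beq_self_eq_true, List.filter_cons, hmin]
          rw [ih]
          by_cases he : (t.filter PySem.Chars.isdigit).foldl min c = c
          · simp [he]; ring
          · have : c ≠ (t.filter PySem.Chars.isdigit).foldl min c := fun h => he h.symm
            simp [he, this]
        · have hgt : m < c := lt_of_le_of_ne (not_lt.mp hlt) (fun h => heq h.symm)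
          have hmin : min m c = m := min_eq_left (le_of_lt hgt)
          have hbe : (c == m) = false := beq_eq_false_iff_ne.mpr heq
          simp only [List.foldl_cons, pvStepA, hd, if_true, hlt, if_false, hbe,
            Bool.false_eq_true, List.filter_cons, hmin]
          rw [ih]
          have hle : (t.filter PySem.Chars.isdigit).foldl min m ≤ m := pv_foldl_min_le _ _
          have hne : c ≠ (t.filter PySem.Chars.isdigit).foldl min m := fun h =>
            absurd hgt (not_lt.mpr (h ▸ hle))
          by_cases he : (t.filter PySem.Chars.isdigit).foldl min m = m
          · simp [he, heq]
          · simp [he, hne]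
    · simp only [List.foldl_cons, pvStepA, hd, List.filter_cons]
      exact ih m k

theorem pv_main (l : List Char) :
    ((l.foldl pvStepA (0, none)).1 == 1) =
      (match PySem.List.min? (l.filter PySem.Chars.isdigit) (fun c => c) with
       | none => false
       | some m => (l.filter PySem.Chars.isdigit).count m == 1) := by
  induction l with
  | nil => simp [PySem.List.min?]
  | cons c t ih =>
    by_cases hd : PySem.Chars.isdigit c = true
    · simp only [List.foldl_cons, pvStepA, hd, if_true, List.filter_cons]
      rw [pv_foldl_stepA_some, PySem.List.min?_id_cons]
      have hle : (t.filter PySem.Chars.isdigit).foldl min c ≤ c := pv_foldl_min_le _ _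
      by_cases he : (t.filter PySem.Chars.isdigit).foldl min c = c
      · simp only [he, if_true]
        have : (c :: t.filter PySem.Chars.isdigit).count c
            = (t.filter PySem.Chars.isdigit).count c + 1 := by simp
        rw [this]
        rcases Nat.eq_zero_or_pos ((t.filter PySem.Chars.isdigit).count c) with h0 | hp
        · simp [h0]
        · have h1 : (1 + ((t.filter PySem.Chars.isdigit).count c : Int) == 1) = false := by
            simp only [beq_eq_false_iff_ne, ne_eq]; omega
          have h2 : (((t.filter PySem.Chars.isdigit).count c + 1 : Nat) == 1) = false := by
            simp only [beq_eq_false_iff_ne, ne_eq]; omega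
          simp [h1, h2]
      · have hne : c ≠ (t.filter PySem.Chars.isdigit).foldl min c := fun h => he h.symm
        simp only [he, if_false]
        have : (c :: t.filter PySem.Chars.isdigit).count ((t.filter PySem.Chars.isdigit).foldl min c)
            = (t.filter PySem.Chars.isdigit).count ((t.filter PySem.Chars.isdigit).foldl min c) := by
          simp [hne]
        rw [this]
        rcases Nat.lt_or_ge ((t.filter PySem.Chars.isdigit).count ((t.filter PySem.Chars.isdigit).foldl min c)) 2 with h | h
        · interval_cases h' : (t.filter PySem.Chars.isdigit).count ((t.filter PySem.Chars.isdigit).foldl min c) <;> simp_all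
        · have h1 : (((t.filter PySem.Chars.isdigit).count ((t.filter PySem.Chars.isdigit).foldl min c) : Int) == 1) = false := by
            simp only [beq_eq_false_iff_ne, ne_eq]; omega
          have h2 : (((t.filter PySem.Chars.isdigit).count ((t.filter PySem.Chars.isdigit).foldl min c) : Nat) == 1) = false := by
            simp only [beq_eq_false_iff_ne, ne_eq]; omega
          simp [h1, h2]
    · simp only [List.foldl_cons, pvStepA, hd, List.filter_cons]
      exact ih

-- ===== VERDICT (by name: the statement is the Claim_ definition above) =====
theorem plus_petit_chiffre_apparait_une_seul_fois_spec : Claim_equal_plus_petit_chiffre_apparait_une_seul_fois := by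
  intro chaine _
  unfold Spec_plus_petit_chiffre_apparait_une_seul_fois
  unfold plus_petit_chiffre_apparait_une_seul_fois plus_petit_chiffre_apparait_une_seul_fois_alt
  exact pv_main chaine.toList
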